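-- pv_equiv track=rewrite | github.com/amruthsrepo/Practice_programs | Coding rounds/Amazon/old/getMinRelocation.py | getMinRelocation
-- ===== SOURCE A (Python) =====
-- def getMinRelocation(regionStart, regionEnd):
--     regionRange = list(zip(regionStart, regionEnd))
--     regionRange.sort(key= lambda x: x[0])
--     numRelocations = 0
--     prevMax = regionRange[0][1]
--     for start, end in regionRange[1:]:
--         if start <= prevMax:
--             prevMax = max(prevMax, end)
--         else:
--             numRelocations += 1
--             prevMax = end
--     return numRelocations
-- ===== SOURCE B (Python) =====
-- def getMinRelocation(regionStart, regionEnd):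
--     pairs = sorted(zip(regionStart, regionEnd), key=lambda p: p[0])
--     m = pairs[0][1]
--     prefix = []
--     for _, e in pairs:
--         if e > m:
--             m = e
--         prefix.append(m)
--     return sum(1 for (s, _), pm in zip(pairs[1:], prefix) if s > pm)
-- ===== Notes on version B (the rewrite author's own statement) =====
-- stated objective: alternative
-- what changed: replaces A's stateful merge loop (prevMax with conditional reset on a gap) by a pure two-pass characterization: build the running-prefix-maximum list of interval ends, then count positions whose start exceeds the prefix maximum of all earlier ends
import Mathlib
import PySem

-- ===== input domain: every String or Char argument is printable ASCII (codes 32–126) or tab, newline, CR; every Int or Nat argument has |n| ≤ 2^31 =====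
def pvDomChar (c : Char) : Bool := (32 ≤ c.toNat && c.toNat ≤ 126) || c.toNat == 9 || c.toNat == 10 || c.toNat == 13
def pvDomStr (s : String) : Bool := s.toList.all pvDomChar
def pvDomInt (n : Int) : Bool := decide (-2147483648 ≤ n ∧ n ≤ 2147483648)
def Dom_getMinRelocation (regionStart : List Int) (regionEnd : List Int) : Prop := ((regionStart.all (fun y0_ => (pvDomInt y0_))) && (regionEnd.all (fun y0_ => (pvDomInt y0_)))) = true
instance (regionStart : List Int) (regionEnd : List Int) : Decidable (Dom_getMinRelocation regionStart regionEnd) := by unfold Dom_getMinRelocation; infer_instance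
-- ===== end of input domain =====

-- B replaces A's stateful merge loop (prevMax with conditional reset) by a pure two-pass
-- characterization: running prefix maxima of ends, then count starts exceeding the previous prefix max.


-- ===== PORT A =====
def getMinRelocation (regionStart : List Int) (regionEnd : List Int) : Int :=
  let regionRange := PySem.List.sorted (List.zip regionStart regionEnd) (fun x => x.1)
  match regionRange with
  | [] => 0  -- unreachable under Pre_: Python raises IndexError at regionRange[0][1]
  | first :: rest =>
    (rest.foldl (fun (st : Int × Int) p =>
        if p.1 ≤ st.2 then (st.1, max st.2 p.2) else (st.1 + 1, p.2)) (0, first.2)).1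

-- ===== PORT B =====
def getMinRelocation_alt (regionStart : List Int) (regionEnd : List Int) : Int :=
  let pairs := PySem.List.sorted (List.zip regionStart regionEnd) (fun p => p.1)
  match pairs with
  | [] => 0  -- unreachable under Pre_: Python raises IndexError at pairs[0][1]
  | first :: _ =>
    let pref := (pairs.foldl (fun (acc : List Int × Int) p =>
        let m := if p.2 > acc.2 then p.2 else acc.2
        (acc.1 ++ [m], m)) (([] : List Int), first.2)).1
    (List.zip (PySem.List.slice pairs (some 1) none) pref).foldl
      (fun c x => if x.1.1 > x.2 then c + 1 else c) 0

-- ===== PRECONDITION & SPEC =====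
-- Pre_ excludes exactly the inputs where Python A raises IndexError (an empty zip of the two lists).
def Pre_getMinRelocation (regionStart : List Int) (regionEnd : List Int) : Prop :=
  regionStart ≠ [] ∧ regionEnd ≠ []
instance (regionStart : List Int) (regionEnd : List Int) : Decidable (Pre_getMinRelocation regionStart regionEnd) := by unfold Pre_getMinRelocation; infer_instance
def pvWitness_getMinRelocation : List Int × List Int := ([1, 5], [2, 7])

def Spec_getMinRelocation (regionStart : List Int) (regionEnd : List Int) (out : Int) : Prop := out = getMinRelocation_alt regionStart regionEnd
instance (regionStart : List Int) (regionEnd : List Int) (out : Int) : Decidable (Spec_getMinRelocation regionStart regionEnd out) := by unfold Spec_getMinRelocation; infer_instance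

-- ===== CLAIM (what is proved, stated in full; the proofs are below) =====
def Claim_equal_getMinRelocation : Prop := ∀ (regionStart : List Int) (regionEnd : List Int), Dom_getMinRelocation regionStart regionEnd → Pre_getMinRelocation regionStart regionEnd → Spec_getMinRelocation regionStart regionEnd (getMinRelocation regionStart regionEnd)

-- ===== LEMMAS AND PROOFS =====

-- gap count relative to a running prefix maximum M of the ends seen so far
def pvCountB (M : Int) : List (Int × Int) → Int
  | [] => 0
  | p :: t => (if M < p.1 then 1 else 0) + pvCountB (if p.2 > M then p.2 else M) t

-- running prefix maxima of the ends, seeded with M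
def pvScanMax (M : Int) : List (Int × Int) → List Int
  | [] => []
  | p :: t => (if p.2 > M then p.2 else M) :: pvScanMax (if p.2 > M then p.2 else M) t

theorem pv_prefix_fold (l : List (Int × Int)) : ∀ (done : List Int) (M : Int),
    (l.foldl (fun (acc : List Int × Int) p =>
        let m := if p.2 > acc.2 then p.2 else acc.2
        (acc.1 ++ [m], m)) (done, M)).1 = done ++ pvScanMax M l := by
  induction l with
  | nil => intro done M; simp [pvScanMax]
  | cons p t ih =>
      intro done M
      simp only [List.foldl_cons, pvScanMax, ih]
      simp

theorem pv_zip_count (t : List (Int × Int)) : ∀ (M c : Int),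
    (List.zip t (M :: pvScanMax M t)).foldl
      (fun c x => if x.1.1 > x.2 then c + 1 else c) c = c + pvCountB M t := by
  induction t with
  | nil => intro M c; simp [pvCountB]
  | cons p t' ih =>
      intro M c
      simp only [pvScanMax, List.zip_cons_cons, List.foldl_cons, pvCountB, ih]
      split_ifs with h1 h2 <;> omega

theorem pv_loopA (l : List (Int × Int)) : ∀ (pm M cnt : Int), pm ≤ M →
    (∀ p ∈ l, pm < p.1 → M < p.1) →
    l.Pairwise (fun a b => a.1 ≤ b.1) →
    (l.foldl (fun (st : Int × Int) p =>
        if p.1 ≤ st.2 then (st.1, max st.2 p.2) else (st.1 + 1, p.2)) (cnt, pm)).1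
      = cnt + pvCountB M l := by
  induction l with
  | nil => intro pm M cnt _ _ _; simp [pvCountB]
  | cons p t ih =>
      intro pm M cnt hle hinv hpw
      rcases List.pairwise_cons.mp hpw with ⟨hhead, htail⟩
      simp only [List.foldl_cons, pvCountB]
      by_cases h : p.1 ≤ pm
      · have hM : ¬ M < p.1 := by omega
        rw [if_pos h, ih (max pm p.2) (if p.2 > M then p.2 else M) cnt
              (by split <;> simp <;> omega)
              (by intro q hq hlt
                  have h1 : pm < q.1 := lt_of_le_of_lt (le_max_left _ _) hlt
                  have h2 : p.2 < q.1 := lt_of_le_of_lt (le_max_right _ _) hlt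
                  have := hinv q (List.mem_cons_of_mem _ hq) h1
                  split <;> omega)
              htail]
        simp [hM]
      · have hpm : pm < p.1 := by omega
        have hM : M < p.1 := hinv p (List.mem_cons_self) hpm
        rw [if_neg h, ih p.2 (if p.2 > M then p.2 else M) (cnt + 1)
              (by split <;> omega)
              (by intro q hq hlt
                  have hq1 : p.1 ≤ q.1 := hhead q hq
                  split <;> omega)
              htail]
        simp [hM]
        omega

theorem pv_ends_agree (regionStart regionEnd : List Int)
    (h : PySem.List.sorted (List.zip regionStart regionEnd) (fun p => p.1) ≠ []) :
    getMinRelocation regionStart regionEnd = getMinRelocation_alt regionStart regionEnd := by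
  cases hs : PySem.List.sorted (List.zip regionStart regionEnd) (fun p => p.1) with
  | nil => exact absurd hs h
  | cons first rest =>
      have hpw : (first :: rest).Pairwise (fun a b : Int × Int => a.1 ≤ b.1) := by
        rw [← hs]; exact PySem.List.sorted_pairwise _ _
      simp only [getMinRelocation, getMinRelocation_alt, hs]
      rw [pv_prefix_fold, PySem.List.slice_from_one]
      have hscan : pvScanMax first.2 (first :: rest)
          = first.2 :: pvScanMax first.2 rest := by
        simp [pvScanMax]
      rw [hscan]
      simp only [List.nil_append, List.tail_cons]
      rw [pv_zip_count rest first.2 0,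
          pv_loopA rest first.2 first.2 0 le_rfl (fun q _ hq => hq)
            (List.pairwise_cons.mp hpw).2]

-- ===== VERDICT (by name: the statement is the Claim_ definition above) =====
theorem getMinRelocation_spec : Claim_equal_getMinRelocation := by
  intro regionStart regionEnd _hdom hpre
  unfold Spec_getMinRelocation
  apply pv_ends_agree
  rw [Ne, PySem.List.sorted_eq_nil_iff, List.zip_eq_nil_iff]
  rcases hpre with ⟨h1, h2⟩
  tauto
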